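-- pv_equiv track=rewrite | github.com/cmfunderburk/memorizer | memorizer.py | render_char_diff
-- ===== SOURCE A (Python) =====
-- from typing import List, Literal, NoReturn, Protocol, Sequence
-- from difflib import SequenceMatcher
--
-- ANSI_RED_BG = "\033[41m"
--
-- ANSI_GREEN_BG = "\033[42m"
--
-- ANSI_RESET = "\033[0m"
--
-- def render_char_diff(expected: str, actual: str) -> tuple[str, str]:
--     """Render two strings with inline ANSI highlighting for differences."""
--     matcher = SequenceMatcher(a=expected, b=actual, autojunk=False)
--     expected_parts: List[str] = []
--     actual_parts: List[str] = []
--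
--     for tag, i1, i2, j1, j2 in matcher.get_opcodes():
--         exp_segment = expected[i1:i2]
--         act_segment = actual[j1:j2]
--
--         if tag == "equal":
--             expected_parts.append(exp_segment)
--             actual_parts.append(act_segment)
--         elif tag == "delete":
--             expected_parts.append(f"{ANSI_RED_BG}{exp_segment}{ANSI_RESET}")
--         elif tag == "insert":
--             actual_parts.append(f"{ANSI_GREEN_BG}{act_segment}{ANSI_RESET}")
--         elif tag == "replace":
--             expected_parts.append(f"{ANSI_RED_BG}{exp_segment}{ANSI_RESET}")
--             actual_parts.append(f"{ANSI_GREEN_BG}{act_segment}{ANSI_RESET}")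
--
--     return "".join(expected_parts), "".join(actual_parts)
-- ===== SOURCE B (Python) =====
-- ANSI_RED_BG = "\033[41m"
-- ANSI_GREEN_BG = "\033[42m"
-- ANSI_RESET = "\033[0m"
--
--
-- def _longest_match(a, b, b2j, alo, ahi, blo, bhi):
--     """Longest matching block in a[alo:ahi] x b[blo:bhi]; ties to lowest i, then j."""
--     besti, bestj, bestsize = alo, blo, 0
--     j2len = {}
--     for i in range(alo, ahi):
--         newj2len = {}
--         for j in b2j.get(a[i], []):
--             if j < blo:
--                 continue
--             if j >= bhi:
--                 break
--             k = newj2len[j] = j2len.get(j - 1, 0) + 1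
--             if k > bestsize:
--                 besti, bestj, bestsize = i - k + 1, j - k + 1, k
--         j2len = newj2len
--     while besti > alo and bestj > blo and a[besti - 1] == b[bestj - 1]:
--         besti, bestj, bestsize = besti - 1, bestj - 1, bestsize + 1
--     while (besti + bestsize < ahi and bestj + bestsize < bhi
--            and a[besti + bestsize] == b[bestj + bestsize]):
--         bestsize += 1
--     return besti, bestj, bestsize
--
--
-- def _render_side(s, mask, color):
--     """Group maximal runs of equal mask flags; wrap the unmatched runs in the color."""
--     out = []
--     pos = 0
--     while pos < len(s):
--         end = pos
--         while end < len(s) and mask[end] == mask[pos]: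
--             end += 1
--         seg = s[pos:end]
--         out.append(seg if mask[pos] else f"{color}{seg}{ANSI_RESET}")
--         pos = end
--     return "".join(out)
--
--
-- def render_char_diff(expected: str, actual: str) -> tuple[str, str]:
--     """Render two strings with inline ANSI highlighting for differences."""
--     b2j = {}
--     for j, ch in enumerate(actual):
--         b2j.setdefault(ch, []).append(j)
--     exp_mask = [False] * len(expected)
--     act_mask = [False] * len(actual)
--     regions = [(0, len(expected), 0, len(actual))]
--     while regions:
--         alo, ahi, blo, bhi = regions.pop()
--         i, j, k = _longest_match(expected, actual, b2j, alo, ahi, blo, bhi)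
--         if k:
--             for t in range(k):
--                 exp_mask[i + t] = True
--                 act_mask[j + t] = True
--             if alo < i and blo < j:
--                 regions.append((alo, i, blo, j))
--             if i + k < ahi and j + k < bhi:
--                 regions.append((i + k, ahi, j + k, bhi))
--     return (_render_side(expected, exp_mask, ANSI_RED_BG),
--             _render_side(actual, act_mask, ANSI_GREEN_BG))
-- ===== Notes on version B (the rewrite author's own statement) =====
-- stated objective: alternative
-- what changed: B never materialises the opcode/block list A renders from: it marks matched positions directly into two boolean masks while splitting regions around each longest match (no sorting, no block coalescing, no sentinel, no tag dispatch), then renders each string independently by grouping maximal runs of equal mask flags.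
import Mathlib
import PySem

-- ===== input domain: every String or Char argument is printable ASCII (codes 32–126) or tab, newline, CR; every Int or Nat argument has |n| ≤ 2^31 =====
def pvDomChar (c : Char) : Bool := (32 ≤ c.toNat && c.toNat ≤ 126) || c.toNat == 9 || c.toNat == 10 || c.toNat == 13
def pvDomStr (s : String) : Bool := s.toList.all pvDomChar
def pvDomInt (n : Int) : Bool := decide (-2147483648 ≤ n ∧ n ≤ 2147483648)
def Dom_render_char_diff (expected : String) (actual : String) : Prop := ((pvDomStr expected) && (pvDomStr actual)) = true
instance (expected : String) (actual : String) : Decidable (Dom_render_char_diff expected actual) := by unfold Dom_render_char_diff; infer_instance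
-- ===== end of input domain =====

-- B replaces A's opcode tag dispatch by two boolean "matched" masks and an independent
-- run-grouping render pass per side; same output, similar cost ("alternative").

-- ===== shared library port: difflib.SequenceMatcher (autojunk=False, no junk) =====
-- Both Pythons call this stdlib class; it is ported once, step for step from CPython's difflib.

def pvAnsiRed : String := "\x1b[41m"
def pvAnsiGreen : String := "\x1b[42m"
def pvAnsiReset : String := "\x1b[0m"

-- s[i:j] for 0 ≤ i ≤ j within range (the only shape both Pythons use)
def pvSl (s : List Char) (i j : Nat) : String := String.ofList ((s.drop i).take (j - i))

-- b2j: for i, elt in enumerate(b): b2j.setdefault(elt, []).append(i)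
def pvB2j (b : List Char) : PySem.Dict Char (List Nat) :=
  (b.zipIdx).foldl (fun d ci => d.insert ci.1 (d.getD ci.1 [] ++ [ci.2])) PySem.Dict.empty

-- inner loop of find_longest_match: for j in b2j.get(a[i], []): continue / break / update
-- j2len is keyed by Int so that the Python lookup j2len.get(j-1, 0) at j = 0 misses, as in Python.
def pvFlmInner (blo bhi i : Nat) (j2len : PySem.Dict Int Nat) :
    List Nat → PySem.Dict Int Nat → Nat × Nat × Nat → PySem.Dict Int Nat × (Nat × Nat × Nat)
  | [], newd, best => (newd, best)
  | j :: js, newd, best =>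
    if j < blo then pvFlmInner blo bhi i j2len js newd best
    else if bhi ≤ j then (newd, best)
    else
      let k := j2len.getD ((j : Int) - 1) 0 + 1
      let newd := newd.insert (j : Int) k
      let best := if best.2.2 < k then (i + 1 - k, j + 1 - k, k) else best
      pvFlmInner blo bhi i j2len js newd best

-- outer loop: for i in range(alo, ahi)
def pvFlmOuter (a : List Char) (b2j : PySem.Dict Char (List Nat)) (blo bhi : Nat) :
    List Nat → PySem.Dict Int Nat → Nat × Nat × Nat → Nat × Nat × Nat
  | [], _, best => best
  | i :: is, j2len, best =>
    let r := pvFlmInner blo bhi i j2len (b2j.getD (a.getD i ' ') []) PySem.Dict.empty best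
    pvFlmOuter a b2j blo bhi is r.1 r.2

-- while besti > alo and bestj > blo and a[besti-1] == b[bestj-1]: extend down
-- (structural recursion on besti, which the loop decrements while besti > alo ≥ 0)
def pvExtLo (a b : List Char) (alo blo : Nat) : Nat → Nat → Nat → Nat × Nat × Nat
  | 0, bestj, bestsize => (0, bestj, bestsize)
  | besti + 1, bestj, bestsize =>
    if alo < besti + 1 ∧ blo < bestj ∧ a.getD besti ' ' = b.getD (bestj - 1) ' ' then
      pvExtLo a b alo blo besti (bestj - 1) (bestsize + 1)
    else (besti + 1, bestj, bestsize)

-- while besti+bestsize < ahi and bestj+bestsize < bhi and a[...] == b[...]: extend up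
-- (fuel ≥ ahi bounds the iterations: each one grows bestsize while besti+bestsize < ahi)
def pvExtHi (a b : List Char) (ahi bhi : Nat) (besti bestj : Nat) : Nat → Nat → Nat
  | 0, bestsize => bestsize
  | fuel + 1, bestsize =>
    if besti + bestsize < ahi ∧ bestj + bestsize < bhi ∧
        a.getD (besti + bestsize) ' ' = b.getD (bestj + bestsize) ' ' then
      pvExtHi a b ahi bhi besti bestj fuel (bestsize + 1)
    else bestsize

def pvFlm (a b : List Char) (b2j : PySem.Dict Char (List Nat)) (alo ahi blo bhi : Nat) :
    Nat × Nat × Nat :=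
  let r := pvFlmOuter a b2j blo bhi (List.range' alo (ahi - alo)) PySem.Dict.empty (alo, blo, 0)
  let r := pvExtLo a b alo blo r.1 r.2.1 r.2.2
  (r.1, r.2.1, pvExtHi a b ahi bhi r.1 r.2.1 ahi r.2.2)

-- the queue loop of get_matching_blocks; the queue is kept reversed (push/pop at the head =
-- Python's append/pop at the tail); fuel la+lb+1 bounds the iteration count (the measure
-- Σ (ahi-alo)+(bhi-blo)+1 over the queue starts there and drops by ≥ 1 each round)
def pvMbLoop (a b : List Char) (b2j : PySem.Dict Char (List Nat)) :
    Nat → List (Nat × Nat × Nat × Nat) → List (Nat × Nat × Nat) → List (Nat × Nat × Nat)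
  | 0, _, acc => acc
  | _ + 1, [], acc => acc
  | fuel + 1, (alo, ahi, blo, bhi) :: queue, acc =>
    let r := pvFlm a b b2j alo ahi blo bhi
    let k := r.2.2
    if k ≠ 0 then
      let q := queue
      let q := if alo < r.1 ∧ blo < r.2.1 then (alo, r.1, blo, r.2.1) :: q else q
      let q := if r.1 + k < ahi ∧ r.2.1 + k < bhi then (r.1 + k, ahi, r.2.1 + k, bhi) :: q else q
      pvMbLoop a b b2j fuel q (acc ++ [(r.1, r.2.1, k)])
    else pvMbLoop a b b2j fuel queue acc

-- matching_blocks.sort(): Python's lexicographic tuple order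
def pvBlockLE (x y : Nat × Nat × Nat) : Bool :=
  decide (x.1 < y.1 ∨ (x.1 = y.1 ∧ (x.2.1 < y.2.1 ∨ (x.2.1 = y.2.1 ∧ x.2.2 ≤ y.2.2))))

-- the adjacent-block coalescing loop (i1 j1 k1 start at 0 0 0)
def pvMergeAdj : List (Nat × Nat × Nat) → Nat → Nat → Nat → List (Nat × Nat × Nat)
  | [], i1, j1, k1 => if k1 ≠ 0 then [(i1, j1, k1)] else []
  | (i2, j2, k2) :: rest, i1, j1, k1 =>
    if i1 + k1 = i2 ∧ j1 + k1 = j2 then pvMergeAdj rest i1 j1 (k1 + k2)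
    else (if k1 ≠ 0 then [(i1, j1, k1)] else []) ++ pvMergeAdj rest i2 j2 k2

def pvMatchingBlocks (a b : List Char) : List (Nat × Nat × Nat) :=
  let la := a.length
  let lb := b.length
  let raw := pvMbLoop a b (pvB2j b) (la + lb + 1) [(0, la, 0, lb)] []
  pvMergeAdj (raw.mergeSort pvBlockLE) 0 0 0 ++ [(la, lb, 0)]

-- ===== PORT A =====
-- get_opcodes(): derived from get_matching_blocks with two cursors, as in CPython difflib
def pvOpcodes : List (Nat × Nat × Nat) → Nat → Nat → List (String × Nat × Nat × Nat × Nat)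
  | [], _, _ => []
  | (ai, bj, size) :: rest, i, j =>
    (if i < ai ∧ j < bj then [("replace", i, ai, j, bj)]
     else if i < ai then [("delete", i, ai, j, bj)]
     else if j < bj then [("insert", i, ai, j, bj)]
     else [])
    ++ (if size ≠ 0 then [("equal", ai, ai + size, bj, bj + size)] else [])
    ++ pvOpcodes rest (ai + size) (bj + size)

-- A's for-loop over the opcodes, dispatching on the tag
def pvALoop (e a : List Char) :
    List (String × Nat × Nat × Nat × Nat) → List String → List String → List String × List String
  | [], eps, aps => (eps, aps)
  | (tag, i1, i2, j1, j2) :: rest, eps, aps =>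
    let es := pvSl e i1 i2
    let bs := pvSl a j1 j2
    if tag = "equal" then pvALoop e a rest (eps ++ [es]) (aps ++ [bs])
    else if tag = "delete" then pvALoop e a rest (eps ++ [pvAnsiRed ++ es ++ pvAnsiReset]) aps
    else if tag = "insert" then pvALoop e a rest eps (aps ++ [pvAnsiGreen ++ bs ++ pvAnsiReset])
    else if tag = "replace" then
      pvALoop e a rest (eps ++ [pvAnsiRed ++ es ++ pvAnsiReset])
        (aps ++ [pvAnsiGreen ++ bs ++ pvAnsiReset])
    else pvALoop e a rest eps aps

def render_char_diff (expected : String) (actual : String) : String × String :=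
  let e := expected.toList
  let a := actual.toList
  let r := pvALoop e a (pvOpcodes (pvMatchingBlocks e a) 0 0) [] []
  (PySem.Str.join "" r.1, PySem.Str.join "" r.2)

-- ===== PORT B =====
-- for t in range(k): mask[pos+t] = True
def pvSetRun (m : List Bool) (pos : Nat) (size : Nat) : List Bool :=
  (List.range size).foldl (fun m k => m.set (pos + k) true) m

-- B's region loop: pop a region, find its longest match, mark both masks, push the
-- two sub-regions (list kept reversed: head-push/pop = Python's append/pop at the tail);
-- fuel la+lb+1 bounds the iterations exactly as in pvMbLoop
def pvMarkLoop (a b : List Char) (b2j : PySem.Dict Char (List Nat)) :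
    Nat → List (Nat × Nat × Nat × Nat) → List Bool × List Bool → List Bool × List Bool
  | 0, _, masks => masks
  | _ + 1, [], masks => masks
  | fuel + 1, (alo, ahi, blo, bhi) :: regions, masks =>
    let r := pvFlm a b b2j alo ahi blo bhi
    let k := r.2.2
    if k ≠ 0 then
      let masks := (pvSetRun masks.1 r.1 k, pvSetRun masks.2 r.2.1 k)
      let q := regions
      let q := if alo < r.1 ∧ blo < r.2.1 then (alo, r.1, blo, r.2.1) :: q else q
      let q := if r.1 + k < ahi ∧ r.2.1 + k < bhi then (r.1 + k, ahi, r.2.1 + k, bhi) :: q else q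
      pvMarkLoop a b b2j fuel q masks
    else pvMarkLoop a b b2j fuel regions masks

-- inner while: end += 1 while end < len(s) and mask[end] == mask[pos]
def pvRunEnd (len : Nat) (mask : List Bool) (v : Bool) (e : Nat) : Nat :=
  if h : e < len ∧ mask.getD e false = v then pvRunEnd len mask v (e + 1) else e
termination_by len - e
decreasing_by omega

theorem pvRunEnd_ge (len : Nat) (mask : List Bool) (v : Bool) (e : Nat) :
    e ≤ pvRunEnd len mask v e := by
  rw [pvRunEnd]
  split
  · exact Nat.le_trans (Nat.le_succ e) (pvRunEnd_ge len mask v (e + 1))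
  · exact Nat.le_refl e
termination_by len - e
decreasing_by omega

theorem pvRunEnd_gt (len : Nat) (mask : List Bool) (pos : Nat) (h : pos < len) :
    pos < pvRunEnd len mask (mask.getD pos false) pos := by
  rw [pvRunEnd, dif_pos ⟨h, rfl⟩]
  exact Nat.lt_of_lt_of_le (Nat.lt_succ_self pos) (pvRunEnd_ge len mask _ (pos + 1))

-- outer while of _render_side: emit one run per iteration
def pvRenderLoop (s : List Char) (mask : List Bool) (color : String) (pos : Nat)
    (out : List String) : List String :=
  if _h : pos < s.length then
    let v := mask.getD pos false
    let e := pvRunEnd s.length mask v pos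
    let seg := pvSl s pos e
    pvRenderLoop s mask color e (out ++ [if v then seg else color ++ seg ++ pvAnsiReset])
  else out
termination_by s.length - pos
decreasing_by exact Nat.sub_lt_sub_left _h (pvRunEnd_gt s.length mask pos _h)

def pvRenderSide (s : List Char) (mask : List Bool) (color : String) : String :=
  PySem.Str.join "" (pvRenderLoop s mask color 0 [])

def render_char_diff_alt (expected : String) (actual : String) : String × String :=
  let e := expected.toList
  let a := actual.toList
  let masks := pvMarkLoop e a (pvB2j a) (e.length + a.length + 1)
    [(0, e.length, 0, a.length)] (List.replicate e.length false, List.replicate a.length false)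
  (pvRenderSide e masks.1 pvAnsiRed, pvRenderSide a masks.2 pvAnsiGreen)

-- ===== PRECONDITION & SPEC =====
def Spec_render_char_diff (expected : String) (actual : String) (out : String × String) : Prop := out = render_char_diff_alt expected actual
instance (expected : String) (actual : String) (out : String × String) : Decidable (Spec_render_char_diff expected actual out) := by unfold Spec_render_char_diff; infer_instance

-- ===== CLAIM (what is proved, stated in full; the proofs are below) =====
def Claim_equal_render_char_diff : Prop := ∀ (expected : String) (actual : String), Dom_render_char_diff expected actual → Spec_render_char_diff expected actual (render_char_diff expected actual)

-- ===== LEMMAS AND PROOFS =====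

-- ---------- generic string plumbing ----------

-- concatenation of a list of parts, on the List Char side
def pvCat (l : List String) : List Char := (l.map String.toList).flatten

theorem pvJoinNilCons (x : List Char) (xs : List (List Char)) :
    PySem.Chars.join [] (x :: xs) = x ++ PySem.Chars.join [] xs := by
  cases xs with
  | nil => rw [PySem.Chars.join_singleton, PySem.Chars.join_nil]; simp
  | cons y ys => rw [PySem.Chars.join_cons_cons]; simp

theorem pvJoinNilFlatten : ∀ ls : List (List Char), PySem.Chars.join [] ls = ls.flatten
  | [] => by rw [PySem.Chars.join_nil]; rfl
  | x :: xs => by rw [pvJoinNilCons, pvJoinNilFlatten xs]; rfl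

theorem pvJoin_toList (l : List String) : (PySem.Str.join "" l).toList = pvCat l := by
  rw [PySem.Str.toList_join]
  have h : ("" : String).toList = ([] : List Char) := rfl
  rw [h, pvJoinNilFlatten]; rfl

theorem pvSl_toList (s : List Char) (i j : Nat) :
    (pvSl s i j).toList = (s.drop i).take (j - i) := String.toList_ofList

theorem pvCat_cons (x : String) (l : List String) :
    pvCat (x :: l) = x.toList ++ pvCat l := by simp [pvCat]

theorem pvCat_append (l1 l2 : List String) :
    pvCat (l1 ++ l2) = pvCat l1 ++ pvCat l2 := by simp [pvCat]

theorem pvCat_single (x : String) : pvCat [x] = x.toList := by simp [pvCat]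

-- ---------- A's opcode loop = two-cursor block walk ----------

def pvBLoop (e a : List Char) :
    List (Nat × Nat × Nat) → Nat → Nat → List String → List String → List String × List String
  | [], _, _, eps, aps => (eps, aps)
  | (i0, j0, size) :: rest, i, j, eps, aps =>
    let eps := if i < i0 then eps ++ [pvAnsiRed ++ pvSl e i i0 ++ pvAnsiReset] else eps
    let aps := if j < j0 then aps ++ [pvAnsiGreen ++ pvSl a j j0 ++ pvAnsiReset] else aps
    let eps := if size ≠ 0 then eps ++ [pvSl e i0 (i0 + size)] else eps
    let aps := if size ≠ 0 then aps ++ [pvSl a j0 (j0 + size)] else aps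
    pvBLoop e a rest (i0 + size) (j0 + size) eps aps

theorem pvALoop_opcodes_eq_pvBLoop (e a : List Char) (bs : List (Nat × Nat × Nat)) :
    ∀ i j eps aps, pvALoop e a (pvOpcodes bs i j) eps aps = pvBLoop e a bs i j eps aps := by
  induction bs with
  | nil => intro i j eps aps; simp [pvOpcodes, pvALoop, pvBLoop]
  | cons hd rest ih =>
    obtain ⟨ai, bj, size⟩ := hd
    intro i j eps aps
    simp only [pvOpcodes, pvBLoop]
    by_cases h1 : i < ai <;> by_cases h2 : j < bj <;> by_cases h3 : size = 0 <;>
      simp [pvALoop, h1, h2, h3, ih]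

-- ---------- block walk = two independent one-sided walks ----------

def pvProjE (b : Nat × Nat × Nat) : Nat × Nat := (b.1, b.2.2)
def pvProjA (b : Nat × Nat × Nat) : Nat × Nat := (b.2.1, b.2.2)

def pvWalk (s : List Char) (color : String) : List (Nat × Nat) → Nat → List String
  | [], _ => []
  | (p0, sz) :: rest, p =>
    (if p < p0 then [color ++ pvSl s p p0 ++ pvAnsiReset] else [])
    ++ (if sz ≠ 0 then [pvSl s p0 (p0 + sz)] else [])
    ++ pvWalk s color rest (p0 + sz)

theorem pvBLoop_eq_walks (e a : List Char) :
    ∀ blocks i j eps aps, pvBLoop e a blocks i j eps aps =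
      (eps ++ pvWalk e pvAnsiRed (blocks.map pvProjE) i,
       aps ++ pvWalk a pvAnsiGreen (blocks.map pvProjA) j) := by
  intro blocks
  induction blocks with
  | nil => intro i j eps aps; simp [pvBLoop, pvWalk]
  | cons b rest ih =>
    obtain ⟨i0, j0, sz⟩ := b
    intro i j eps aps
    simp only [pvBLoop, List.map_cons, pvProjE, pvProjA, pvWalk, ih]
    by_cases h1 : i < i0 <;> by_cases h2 : j < j0 <;> by_cases h3 : sz = 0 <;>
      simp [h1, h2, h3, List.append_assoc]

-- ---------- run-end characterisations ----------

theorem pvRunEnd_eq (len : Nat) (mask : List Bool) (v : Bool) (p m : Nat)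
    (h1 : p ≤ m) (h2 : m ≤ len)
    (hall : ∀ q, p ≤ q → q < m → mask.getD q false = v)
    (hstop : m = len ∨ mask.getD m false ≠ v) :
    pvRunEnd len mask v p = m := by
  rw [pvRunEnd]
  by_cases hpm : p = m
  · subst hpm
    rw [dif_neg]
    rintro ⟨hl, hv⟩
    rcases hstop with h | h
    · omega
    · exact h hv
  · have hplt : p < m := lt_of_le_of_ne h1 hpm
    rw [dif_pos ⟨by omega, hall p le_rfl hplt⟩]
    exact pvRunEnd_eq len mask v (p + 1) m (by omega) h2
      (fun q hq hq' => hall q (by omega) hq') hstop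
termination_by m - p
decreasing_by omega

theorem pvRunEnd_all (len : Nat) (mask : List Bool) (v : Bool) (p : Nat) :
    ∀ q, p ≤ q → q < pvRunEnd len mask v p → mask.getD q false = v := by
  intro q hq1 hq2
  by_cases h : p < len ∧ mask.getD p false = v
  · rw [pvRunEnd, dif_pos h] at hq2
    rcases Nat.eq_or_lt_of_le hq1 with he | hlt
    · subst he; exact h.2
    · exact pvRunEnd_all len mask v (p + 1) q (by omega) hq2
  · rw [pvRunEnd, dif_neg h] at hq2; omega
termination_by len - p
decreasing_by
  exact Nat.sub_lt_sub_left h.1 (Nat.lt_succ_self p)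

theorem pvRunEnd_congr (len : Nat) (mask : List Bool) (v : Bool) (p m : Nat)
    (h1 : p ≤ m) (h2 : m ≤ len)
    (hall : ∀ q, p ≤ q → q < m → mask.getD q false = v) :
    pvRunEnd len mask v p = pvRunEnd len mask v m := by
  by_cases hpm : p = m
  · subst hpm; rfl
  · have hplt : p < m := lt_of_le_of_ne h1 hpm
    rw [pvRunEnd, dif_pos ⟨by omega, hall p le_rfl hplt⟩]
    exact pvRunEnd_congr len mask v (p + 1) m (by omega) h2
      (fun q hq hq' => hall q (by omega) hq')
termination_by m - p
decreasing_by omega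

-- ---------- render loop: accumulator, one step, splitting an all-true run ----------

theorem pvRenderLoop_out (s : List Char) (mask : List Bool) (color : String)
    (p : Nat) (out : List String) :
    pvRenderLoop s mask color p out = out ++ pvRenderLoop s mask color p [] := by
  by_cases h : p < s.length
  · rw [pvRenderLoop]
    conv_rhs => rw [pvRenderLoop]
    simp only [dif_pos h]
    rw [pvRenderLoop_out s mask color _ (out ++ [_]),
        pvRenderLoop_out s mask color _ ([] ++ [_])]
    simp [List.append_assoc]
  · rw [pvRenderLoop]
    conv_rhs => rw [pvRenderLoop]
    simp [dif_neg h]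
termination_by s.length - p
decreasing_by
  all_goals exact Nat.sub_lt_sub_left h (pvRunEnd_gt s.length mask p h)

theorem pvRenderLoop_step (s : List Char) (mask : List Bool) (color : String) (p : Nat)
    (h : p < s.length) :
    pvRenderLoop s mask color p [] =
      [if mask.getD p false then pvSl s p (pvRunEnd s.length mask (mask.getD p false) p)
       else color ++ pvSl s p (pvRunEnd s.length mask (mask.getD p false) p) ++ pvAnsiReset]
      ++ pvRenderLoop s mask color (pvRunEnd s.length mask (mask.getD p false) p) [] := by
  conv_lhs => rw [pvRenderLoop]
  rw [dif_pos h]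
  rw [pvRenderLoop_out]
  simp only [List.nil_append]

theorem pvRender_split (s : List Char) (mask : List Bool) (color : String) (p m : Nat)
    (hpm : p ≤ m) (hm : m ≤ s.length)
    (hall : ∀ q, p ≤ q → q < m → mask.getD q false = true) :
    pvCat (pvRenderLoop s mask color p []) =
      (s.drop p).take (m - p) ++ pvCat (pvRenderLoop s mask color m []) := by
  rcases Nat.eq_or_lt_of_le hpm with he | hlt
  · subst he; simp
  · have hp : p < s.length := lt_of_lt_of_le hlt hm
    have hmp : mask.getD p false = true := hall p le_rfl hlt
    have hcong : pvRunEnd s.length mask true p = pvRunEnd s.length mask true m :=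
      pvRunEnd_congr s.length mask true p m hpm hm hall
    by_cases hcase : m < s.length ∧ mask.getD m false = true
    · set q0 := pvRunEnd s.length mask true m with hq0def
      have hq0m : m ≤ q0 := pvRunEnd_ge s.length mask true m
      rw [pvRenderLoop_step s mask color p hp, pvRenderLoop_step s mask color m hcase.1]
      rw [hmp, hcase.2]
      simp only [if_true, ← hq0def, hcong]
      rw [pvCat_append, pvCat_append, pvCat_single, pvCat_single, pvSl_toList, pvSl_toList]
      have hsplit : (s.drop p).take (q0 - p) =
          (s.drop p).take (m - p) ++ (s.drop m).take (q0 - m) := by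
        have h0 : q0 - p = (m - p) + (q0 - m) := by omega
        have h1 : p + (m - p) = m := by omega
        rw [h0, List.take_add, List.drop_drop, h1]
      rw [hsplit, List.append_assoc]
    · have hre : pvRunEnd s.length mask true m = m := by
        rw [pvRunEnd, dif_neg]
        intro hc
        exact hcase ⟨hc.1, hc.2⟩
      rw [pvRenderLoop_step s mask color p hp, hmp]
      simp only [if_true, hcong, hre]
      rw [pvCat_append, pvCat_single, pvSl_toList]

-- placeholder to keep structure while developing


-- ---------- coverage mask vs one-sided walk ----------

def pvCovered (q : Nat) (l : List (Nat × Nat)) : Bool :=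
  l.any (fun b => decide (b.1 ≤ q ∧ q < b.1 + b.2))

-- one-sided chain: cursor ≤ each start, blocks in order, zero size only for the final sentinel
def pvGoodS (len : Nat) : Nat → List (Nat × Nat) → Prop
  | p, [] => p = len
  | p, (p0, sz) :: rest =>
    p ≤ p0 ∧ p0 + sz ≤ len ∧ (sz = 0 → p0 = len ∧ rest = []) ∧ pvGoodS len (p0 + sz) rest

theorem pvCovered_lt (len : Nat) :
    ∀ (l : List (Nat × Nat)) (c q : Nat), pvGoodS len c l → q < c → pvCovered q l = false := by
  intro l
  induction l with
  | nil => intro c q _ _; rfl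
  | cons b rest ih =>
    obtain ⟨p0, sz⟩ := b
    intro c q hG hq
    obtain ⟨h1, h2, h3, h4⟩ := hG
    have hr : pvCovered q rest = false := ih (p0 + sz) q h4 (by omega)
    simp only [pvCovered, List.any_cons, Bool.or_eq_false_iff, decide_eq_false_iff_not]
    exact ⟨by omega, by simpa [pvCovered] using hr⟩

theorem pvSide (s : List Char) (color : String) (mask : List Bool) :
    ∀ (l : List (Nat × Nat)) (p : Nat), pvGoodS s.length p l →
      (∀ q, p ≤ q → mask.getD q false = pvCovered q l) →
      pvCat (pvRenderLoop s mask color p []) = pvCat (pvWalk s color l p) := by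
  intro l
  induction l with
  | nil =>
    intro p hG _
    have hp : p = s.length := hG
    rw [pvRenderLoop, dif_neg (by omega)]
    simp [pvWalk]
  | cons b rest ih =>
    obtain ⟨p0, sz⟩ := b
    intro p hG hm
    obtain ⟨h1, h2, h3, h4⟩ := hG
    have hgap : ∀ q, p ≤ q → q < p0 → mask.getD q false = false := by
      intro q hq hq'
      rw [hm q hq]
      have hr : pvCovered q rest = false := pvCovered_lt s.length rest (p0 + sz) q h4 (by omega)
      simp only [pvCovered, List.any_cons, Bool.or_eq_false_iff, decide_eq_false_iff_not]
      exact ⟨by omega, by simpa [pvCovered] using hr⟩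
    by_cases hsz : sz = 0
    · subst hsz
      obtain ⟨hp0, hrest⟩ := h3 rfl
      subst hrest
      rcases Nat.eq_or_lt_of_le h1 with he | hlt
      · subst he
        rw [pvRenderLoop, dif_neg (by omega)]
        simp [pvWalk, hp0]
      · have hmp : mask.getD p false = false := hgap p le_rfl hlt
        have hre : pvRunEnd s.length mask false p = p0 := by
          apply pvRunEnd_eq s.length mask false p p0 (by omega) (by omega)
            (fun q hq hq' => hgap q hq hq')
          left; omega
        rw [pvRenderLoop_step s mask color p (by omega), hmp]
        simp only [Bool.false_eq_true, if_false, hre]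
        rw [pvRenderLoop, dif_neg (by omega)]
        simp [pvWalk, hp0, show p < s.length from by omega]
    · have hmtrue : ∀ q, p0 ≤ q → q < p0 + sz → mask.getD q false = true := by
        intro q hq hq'
        rw [hm q (by omega)]
        simp only [pvCovered, List.any_cons, Bool.or_eq_true_iff]
        left; simp; omega
      have hmrest : ∀ q, p0 + sz ≤ q → mask.getD q false = pvCovered q rest := by
        intro q hq
        rw [hm q (by omega)]
        simp only [pvCovered, List.any_cons]
        have : ¬(p0 ≤ q ∧ q < p0 + sz) := by omega
        simp [this]
      have key : pvCat (pvRenderLoop s mask color p0 []) =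
          (s.drop p0).take sz ++ pvCat (pvWalk s color rest (p0 + sz)) := by
        rw [pvRender_split s mask color p0 (p0 + sz) (by omega) h2
          (fun q hq hq' => hmtrue q hq hq')]
        rw [ih (p0 + sz) h4 hmrest]
        congr 2
        omega
      rcases Nat.eq_or_lt_of_le h1 with he | hlt
      · subst he
        rw [key]
        simp only [pvWalk, if_neg (lt_irrefl p), if_pos hsz, List.nil_append,
          List.singleton_append]
        rw [pvCat_cons, pvSl_toList]
        have hsz' : p + sz - p = sz := by omega
        rw [hsz']
      · have hmp : mask.getD p false = false := hgap p le_rfl hlt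
        have hre : pvRunEnd s.length mask false p = p0 := by
          apply pvRunEnd_eq s.length mask false p p0 (by omega) (by omega)
            (fun q hq hq' => hgap q hq hq')
          right
          rw [hmtrue p0 le_rfl (by omega)]
          simp
        rw [pvRenderLoop_step s mask color p (by omega), hmp]
        simp only [Bool.false_eq_true, if_false, hre]
        rw [pvCat_append, pvCat_single, key]
        simp only [pvWalk, if_pos hlt, if_pos hsz]
        simp only [pvCat, List.map_append, List.map_cons, List.map_nil, List.flatten_append,
          List.flatten_cons, List.flatten_nil, List.append_nil, List.append_assoc, pvSl_toList]
        have h5 : p0 + sz - p0 = sz := by omega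
        rw [h5]

-- ---------- the built masks compute coverage ----------

theorem pvSetRun_length (m : List Bool) (pos : Nat) :
    ∀ sz, (pvSetRun m pos sz).length = m.length := by
  intro sz
  induction sz with
  | zero => rfl
  | succ n ih =>
    have step : pvSetRun m pos (n + 1) = (pvSetRun m pos n).set (pos + n) true := by
      unfold pvSetRun
      rw [List.range_succ, List.foldl_append]
      rfl
    rw [step, List.length_set, ih]

theorem pvSetRun_getD (m : List Bool) (pos : Nat) :
    ∀ sz, pos + sz ≤ m.length → ∀ q,
      (pvSetRun m pos sz).getD q false = (decide (pos ≤ q ∧ q < pos + sz) || m.getD q false) := by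
  intro sz
  induction sz with
  | zero =>
    intro _ q
    have h0 : ¬(pos ≤ q ∧ q < pos + 0) := by omega
    simp only [pvSetRun, List.range_zero, List.foldl_nil, decide_eq_false h0, Bool.false_or]
  | succ n ih =>
    intro hb q
    have step : pvSetRun m pos (n + 1) = (pvSetRun m pos n).set (pos + n) true := by
      unfold pvSetRun
      rw [List.range_succ, List.foldl_append]
      rfl
    rw [step, List.getD_eq_getElem?_getD, List.getElem?_set]
    by_cases hq : pos + n = q
    · subst hq
      rw [if_pos rfl]
      have hlen : pos + n < (pvSetRun m pos n).length := by rw [pvSetRun_length]; omega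
      rw [if_pos hlen]
      have hq2 : pos ≤ pos + n ∧ pos + n < pos + (n + 1) := by omega
      simp [hq2]
    · rw [if_neg hq, ← List.getD_eq_getElem?_getD, ih (by omega) q]
      have : (pos ≤ q ∧ q < pos + n) ↔ (pos ≤ q ∧ q < pos + (n + 1)) := by omega
      rw [decide_eq_decide.mpr this]

theorem pvMaskFold_getD :
    ∀ (bs : List (Nat × Nat)) (init : List Bool),
      (∀ b ∈ bs, b.1 + b.2 ≤ init.length) → ∀ q,
      (bs.foldl (fun m (b : Nat × Nat) => pvSetRun m b.1 b.2) init).getD q false =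
        (pvCovered q bs || init.getD q false) := by
  intro bs
  induction bs with
  | nil => intro init _ q; simp [pvCovered]
  | cons b rest ih =>
    intro init hb q
    rw [List.foldl_cons, ih (pvSetRun init b.1 b.2)
      (by intro x hx; rw [pvSetRun_length]; exact hb x (List.mem_cons_of_mem b hx)) q]
    rw [pvSetRun_getD init b.1 b.2 (hb b (List.mem_cons_self)) q]
    by_cases hc : b.1 ≤ q ∧ q < b.1 + b.2
    · simp [pvCovered, List.any_cons, hc]
    · have h1 : (decide (b.1 ≤ q) && decide (q < b.1 + b.2)) = false := by
        by_cases hx : b.1 ≤ q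
        · simp [hx]; omega
        · simp [hx]
      simp [pvCovered, List.any_cons, h1]

theorem pvReplicate_getD (n q : Nat) : (List.replicate n false).getD q false = false := by
  rw [List.getD_eq_getElem?_getD, List.getElem?_replicate]
  split <;> rfl


-- ---------- difflib invariants: every emitted block chain-separates the others ----------

-- block x = (i, j, k); rect r = (alo, ahi, blo, bhi)
def pvChainB (x y : Nat × Nat × Nat) : Prop :=
  x.1 + x.2.2 ≤ y.1 ∧ x.2.1 + x.2.2 ≤ y.2.1

def pvSepBB (x y : Nat × Nat × Nat) : Prop := pvChainB x y ∨ pvChainB y x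

def pvInR (x : Nat × Nat × Nat) (r : Nat × Nat × Nat × Nat) : Prop :=
  r.1 ≤ x.1 ∧ x.1 + x.2.2 ≤ r.2.1 ∧ r.2.2.1 ≤ x.2.1 ∧ x.2.1 + x.2.2 ≤ r.2.2.2

def pvROK (la lb : Nat) (r : Nat × Nat × Nat × Nat) : Prop :=
  r.1 ≤ r.2.1 ∧ r.2.2.1 ≤ r.2.2.2 ∧ r.2.1 ≤ la ∧ r.2.2.2 ≤ lb

def pvSepRR (r t : Nat × Nat × Nat × Nat) : Prop :=
  (r.2.1 ≤ t.1 ∧ r.2.2.2 ≤ t.2.2.1) ∨ (t.2.1 ≤ r.1 ∧ t.2.2.2 ≤ r.2.2.1)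

def pvSepBR (x : Nat × Nat × Nat) (r : Nat × Nat × Nat × Nat) : Prop :=
  (x.1 + x.2.2 ≤ r.1 ∧ x.2.1 + x.2.2 ≤ r.2.2.1) ∨ (r.2.1 ≤ x.1 ∧ r.2.2.2 ≤ x.2.1)

def pvBOK (la lb : Nat) (x : Nat × Nat × Nat) : Prop :=
  x.1 + x.2.2 ≤ la ∧ x.2.1 + x.2.2 ≤ lb ∧ 0 < x.2.2

def pvSub (r' r : Nat × Nat × Nat × Nat) : Prop :=
  r.1 ≤ r'.1 ∧ r'.2.1 ≤ r.2.1 ∧ r.2.2.1 ≤ r'.2.2.1 ∧ r'.2.2.2 ≤ r.2.2.2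

theorem pvSep_of_in (x : Nat × Nat × Nat) (r : Nat × Nat × Nat × Nat) (y : Nat × Nat × Nat)
    (hx : pvInR x r) (hy : pvSepBR y r) : pvSepBB y x := by
  unfold pvInR at hx; unfold pvSepBR at hy; unfold pvSepBB pvChainB
  rcases hy with h | h
  · left; omega
  · right; omega

theorem pvSepBR_of_RR (x : Nat × Nat × Nat) (r t : Nat × Nat × Nat × Nat)
    (hx : pvInR x r) (hrt : pvSepRR r t) : pvSepBR x t := by
  unfold pvInR at hx; unfold pvSepRR at hrt; unfold pvSepBR
  rcases hrt with h | h
  · left; omega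
  · right; omega

theorem pvSepBR_mono (y : Nat × Nat × Nat) (r' r : Nat × Nat × Nat × Nat)
    (hsub : pvSub r' r) (h : pvSepBR y r) : pvSepBR y r' := by
  unfold pvSub at hsub; unfold pvSepBR at h ⊢
  rcases h with h | h
  · left; omega
  · right; omega

theorem pvSepRR_mono (r' r t : Nat × Nat × Nat × Nat)
    (hsub : pvSub r' r) (h : pvSepRR r t) : pvSepRR r' t := by
  unfold pvSub at hsub; unfold pvSepRR at h ⊢
  rcases h with h | h
  · left; omega
  · right; omega

-- j2len invariant: chain lengths recorded so far are bounded by the rows processed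
-- and by the distance to the left edge of the rectangle
def pvDInv (blo cnt : Nat) (d : PySem.Dict Int Nat) : Prop :=
  ∀ z : Int, d.getD z 0 ≤ cnt ∧
    (0 < d.getD z 0 → (blo : Int) ≤ z ∧ (d.getD z 0 : Int) ≤ z + 1 - (blo : Int))

theorem pvDInv_empty (blo cnt : Nat) : pvDInv blo cnt PySem.Dict.empty := by
  intro z
  simp [PySem.Dict.empty, PySem.Dict.getD, PySem.Dict.get?]

theorem pvFlmInner_ok (alo ahi blo bhi i : Nat) (j2len : PySem.Dict Int Nat)
    (hd : pvDInv blo (i - alo) j2len) (hia : alo ≤ i) (hia2 : i < ahi) :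
    ∀ (js : List Nat) (newd : PySem.Dict Int Nat) (best : Nat × Nat × Nat),
      pvDInv blo (i - alo + 1) newd → pvInR best (alo, ahi, blo, bhi) →
      pvDInv blo (i - alo + 1) (pvFlmInner blo bhi i j2len js newd best).1 ∧
      pvInR (pvFlmInner blo bhi i j2len js newd best).2 (alo, ahi, blo, bhi) := by
  intro js
  induction js with
  | nil => intro newd best h1 h2; exact ⟨h1, h2⟩
  | cons j js ih =>
    intro newd best h1 h2
    simp only [pvFlmInner]
    by_cases hj1 : j < blo
    · rw [if_pos hj1]; exact ih newd best h1 h2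
    · rw [if_neg hj1]
      by_cases hj2 : bhi ≤ j
      · rw [if_pos hj2]; exact ⟨h1, h2⟩
      · rw [if_neg hj2]
        have hk1 : j2len.getD ((j : Int) - 1) 0 ≤ i - alo := (hd _).1
        have hk2 : j2len.getD ((j : Int) - 1) 0 + 1 ≤ j - blo + 1 := by
          by_cases hl0 : 0 < j2len.getD ((j : Int) - 1) 0
          · obtain ⟨hz1, hz2⟩ := (hd ((j : Int) - 1)).2 hl0
            omega
          · omega
        refine ih (newd.insert ((j : Int)) (j2len.getD ((j : Int) - 1) 0 + 1))
          (if best.2.2 < j2len.getD ((j : Int) - 1) 0 + 1 then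
            (i + 1 - (j2len.getD ((j : Int) - 1) 0 + 1),
             j + 1 - (j2len.getD ((j : Int) - 1) 0 + 1),
             j2len.getD ((j : Int) - 1) 0 + 1)
           else best) ?_ ?_
        · intro z
          by_cases hz : z = (j : Int)
          · subst hz
            rw [PySem.Dict.getD_insert_self]
            refine ⟨by omega, fun _ => ⟨by omega, by omega⟩⟩
          · rw [PySem.Dict.getD_insert_of_ne _ _ _ hz]
            exact h1 z
        · split_ifs with hbest
          · unfold pvInR at h2 ⊢
            simp only at *
            omega
          · exact h2

theorem pvFlmOuter_ok (a : List Char) (b2j : PySem.Dict Char (List Nat))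
    (alo ahi blo bhi : Nat) :
    ∀ (n i : Nat) (j2len : PySem.Dict Int Nat) (best : Nat × Nat × Nat),
      alo ≤ i → i + n ≤ ahi → pvDInv blo (i - alo) j2len →
      pvInR best (alo, ahi, blo, bhi) →
      pvInR (pvFlmOuter a b2j blo bhi (List.range' i n) j2len best) (alo, ahi, blo, bhi) := by
  intro n
  induction n with
  | zero => intro i j2len best _ _ _ h; simpa [pvFlmOuter] using h
  | succ n ih =>
    intro i j2len best h1 h2 hd hb
    rw [List.range'_succ]
    simp only [pvFlmOuter]
    obtain ⟨hd', hb'⟩ := pvFlmInner_ok alo ahi blo bhi i j2len hd h1 (by omega)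
      (b2j.getD (a.getD i ' ') []) PySem.Dict.empty best (pvDInv_empty blo _) hb
    refine ih (i + 1) _ _ (by omega) (by omega) ?_ hb'
    have he : i + 1 - alo = i - alo + 1 := by omega
    rw [he]
    exact hd'

theorem pvExtLo_ok (a b : List Char) (alo blo ahi bhi : Nat) :
    ∀ (bi bj bk : Nat), pvInR (bi, bj, bk) (alo, ahi, blo, bhi) →
      pvInR (pvExtLo a b alo blo bi bj bk) (alo, ahi, blo, bhi) := by
  intro bi
  induction bi with
  | zero => intro bj bk h; exact h
  | succ n ih =>
    intro bj bk h
    simp only [pvExtLo]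
    split_ifs with hc
    · obtain ⟨hc1, hc2, -⟩ := hc
      refine ih (bj - 1) (bk + 1) ?_
      unfold pvInR at h ⊢
      simp only at *
      omega
    · exact h

theorem pvExtHi_ok (a b : List Char) (ahi bhi bi bj : Nat) :
    ∀ (fuel bk : Nat), bi + bk ≤ ahi → bj + bk ≤ bhi →
      bi + pvExtHi a b ahi bhi bi bj fuel bk ≤ ahi ∧
      bj + pvExtHi a b ahi bhi bi bj fuel bk ≤ bhi := by
  intro fuel
  induction fuel with
  | zero => intro bk h1 h2; exact ⟨h1, h2⟩
  | succ n ih =>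
    intro bk h1 h2
    simp only [pvExtHi]
    split_ifs with hc
    · exact ih (bk + 1) (by omega) (by omega)
    · exact ⟨h1, h2⟩

theorem pvFlm_ok (a b : List Char) (b2j : PySem.Dict Char (List Nat))
    (alo ahi blo bhi : Nat) (h1 : alo ≤ ahi) (h2 : blo ≤ bhi) :
    pvInR (pvFlm a b b2j alo ahi blo bhi) (alo, ahi, blo, bhi) := by
  unfold pvFlm
  have hd0 : pvDInv blo (alo - alo) PySem.Dict.empty := pvDInv_empty blo _
  have hb0 : pvInR (alo, blo, 0) (alo, ahi, blo, bhi) := by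
    unfold pvInR; simp only; omega
  have hout := pvFlmOuter_ok a b2j alo ahi blo bhi (ahi - alo) alo PySem.Dict.empty
    (alo, blo, 0) le_rfl (by omega) hd0 hb0
  set r1 := pvFlmOuter a b2j blo bhi (List.range' alo (ahi - alo)) PySem.Dict.empty
    (alo, blo, 0) with hr1
  have hlo := pvExtLo_ok a b alo blo ahi bhi r1.1 r1.2.1 r1.2.2 hout
  set r2 := pvExtLo a b alo blo r1.1 r1.2.1 r1.2.2 with hr2
  have hhi := pvExtHi_ok a b ahi bhi r2.1 r2.2.1 ahi r2.2.2 hlo.2.1 hlo.2.2.2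
  exact ⟨hlo.1, hhi.1, hlo.2.2.1, hhi.2⟩

theorem pvMbLoop_ok (a b : List Char) (b2j : PySem.Dict Char (List Nat)) (la lb : Nat) :
    ∀ (fuel : Nat) (queue : List (Nat × Nat × Nat × Nat)) (acc : List (Nat × Nat × Nat)),
      (∀ r ∈ queue, pvROK la lb r) → List.Pairwise pvSepRR queue →
      (∀ x ∈ acc, ∀ r ∈ queue, pvSepBR x r) → List.Pairwise pvSepBB acc →
      (∀ x ∈ acc, pvBOK la lb x) →
      List.Pairwise pvSepBB (pvMbLoop a b b2j fuel queue acc) ∧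
      (∀ x ∈ pvMbLoop a b b2j fuel queue acc, pvBOK la lb x) := by
  intro fuel
  induction fuel with
  | zero => intro queue acc _ _ _ h4 h5; exact ⟨h4, h5⟩
  | succ n ih =>
    intro queue acc hq hpw hbr hbb hbok
    cases queue with
    | nil => exact ⟨hbb, hbok⟩
    | cons r queue =>
      obtain ⟨alo, ahi, blo, bhi⟩ := r
      have hrok := hq _ List.mem_cons_self
      have hx : pvInR (pvFlm a b b2j alo ahi blo bhi) (alo, ahi, blo, bhi) :=
        pvFlm_ok a b b2j alo ahi blo bhi hrok.1 hrok.2.1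
      have hqtail : ∀ t ∈ queue, pvROK la lb t :=
        fun t ht => hq t (List.mem_cons_of_mem _ ht)
      have hpw' := List.pairwise_cons.mp hpw
      simp only [pvMbLoop]
      set x := pvFlm a b b2j alo ahi blo bhi with hxdef
      have hxla : x.1 + x.2.2 ≤ la := le_trans hx.2.1 hrok.2.2.1
      have hxlb : x.2.1 + x.2.2 ≤ lb := le_trans hx.2.2.2 hrok.2.2.2
      have hsepx : ∀ y ∈ acc, pvSepBB y (x.1, x.2.1, x.2.2) := by
        intro y hy
        exact pvSep_of_in x _ y hx (hbr y hy _ List.mem_cons_self)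
      have hxq : ∀ t ∈ queue, pvSepBR x t :=
        fun t ht => pvSepBR_of_RR x _ t hx (hpw'.1 t ht)
      have hr1ok : pvROK la lb (alo, x.1, blo, x.2.1) := by
        unfold pvROK at hrok ⊢; unfold pvInR at hx; simp only at *; omega
      have hr2ok : pvROK la lb (x.1 + x.2.2, ahi, x.2.1 + x.2.2, bhi) := by
        unfold pvROK at hrok ⊢; unfold pvInR at hx; simp only at *; omega
      have hsub1 : pvSub (alo, x.1, blo, x.2.1) (alo, ahi, blo, bhi) := by
        unfold pvSub; unfold pvInR at hx; simp only at *; omega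
      have hsub2 : pvSub (x.1 + x.2.2, ahi, x.2.1 + x.2.2, bhi) (alo, ahi, blo, bhi) := by
        unfold pvSub; unfold pvInR at hx; simp only at *; omega
      have hr1q : ∀ t ∈ queue, pvSepRR (alo, x.1, blo, x.2.1) t :=
        fun t ht => pvSepRR_mono _ _ t hsub1 (hpw'.1 t ht)
      have hr2q : ∀ t ∈ queue, pvSepRR (x.1 + x.2.2, ahi, x.2.1 + x.2.2, bhi) t :=
        fun t ht => pvSepRR_mono _ _ t hsub2 (hpw'.1 t ht)
      have hr12 : pvSepRR (x.1 + x.2.2, ahi, x.2.1 + x.2.2, bhi) (alo, x.1, blo, x.2.1) := by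
        unfold pvSepRR; simp only; right; omega
      have hxr1 : pvSepBR x (alo, x.1, blo, x.2.1) := by
        unfold pvSepBR; simp only; right; omega
      have hxr2 : pvSepBR x (x.1 + x.2.2, ahi, x.2.1 + x.2.2, bhi) := by
        unfold pvSepBR; simp only; left; omega
      have haccr1 : ∀ y ∈ acc, pvSepBR y (alo, x.1, blo, x.2.1) :=
        fun y hy => pvSepBR_mono y _ _ hsub1 (hbr y hy _ List.mem_cons_self)
      have haccr2 : ∀ y ∈ acc, pvSepBR y (x.1 + x.2.2, ahi, x.2.1 + x.2.2, bhi) :=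
        fun y hy => pvSepBR_mono y _ _ hsub2 (hbr y hy _ List.mem_cons_self)
      split_ifs with hk hA hB hB'
      case _ =>
        have hbb' : List.Pairwise pvSepBB (acc ++ [(x.1, x.2.1, x.2.2)]) := by
          rw [List.pairwise_append]
          refine ⟨hbb, List.pairwise_singleton _ _, ?_⟩
          intro y hy z hz
          rw [List.mem_singleton] at hz
          subst hz
          exact hsepx y hy
        have hbok' : ∀ y ∈ acc ++ [(x.1, x.2.1, x.2.2)], pvBOK la lb y := by
          intro y hy
          rcases List.mem_append.mp hy with hy | hy
          · exact hbok y hy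
          · rw [List.mem_singleton] at hy
            subst hy
            exact ⟨hxla, hxlb, Nat.pos_of_ne_zero hk⟩
        refine ih _ _ ?_ ?_ ?_ hbb' hbok'
        · intro t ht
          rcases List.mem_cons.mp ht with rfl | ht
          · exact hr2ok
          rcases List.mem_cons.mp ht with rfl | ht
          · exact hr1ok
          · exact hqtail t ht
        · rw [List.pairwise_cons]
          refine ⟨?_, ?_⟩
          · intro t ht
            rcases List.mem_cons.mp ht with rfl | ht
            · exact hr12
            · exact hr2q t ht
          · rw [List.pairwise_cons]
            exact ⟨hr1q, hpw'.2⟩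
        · intro y hy t ht
          rcases List.mem_append.mp hy with hy | hy
          · rcases List.mem_cons.mp ht with rfl | ht
            · exact haccr2 y hy
            rcases List.mem_cons.mp ht with rfl | ht
            · exact haccr1 y hy
            · exact hbr y hy t (List.mem_cons_of_mem _ ht)
          · rw [List.mem_singleton] at hy
            subst hy
            rcases List.mem_cons.mp ht with rfl | ht
            · exact hxr2
            rcases List.mem_cons.mp ht with rfl | ht
            · exact hxr1
            · exact hxq t ht
      case _ =>
        have hbb' : List.Pairwise pvSepBB (acc ++ [(x.1, x.2.1, x.2.2)]) := by
          rw [List.pairwise_append]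
          refine ⟨hbb, List.pairwise_singleton _ _, ?_⟩
          intro y hy z hz
          rw [List.mem_singleton] at hz
          subst hz
          exact hsepx y hy
        have hbok' : ∀ y ∈ acc ++ [(x.1, x.2.1, x.2.2)], pvBOK la lb y := by
          intro y hy
          rcases List.mem_append.mp hy with hy | hy
          · exact hbok y hy
          · rw [List.mem_singleton] at hy
            subst hy
            exact ⟨hxla, hxlb, Nat.pos_of_ne_zero hk⟩
        refine ih _ _ ?_ ?_ ?_ hbb' hbok'
        · intro t ht
          rcases List.mem_cons.mp ht with rfl | ht
          · exact hr2ok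
          · exact hqtail t ht
        · rw [List.pairwise_cons]
          exact ⟨hr2q, hpw'.2⟩
        · intro y hy t ht
          rcases List.mem_append.mp hy with hy | hy
          · rcases List.mem_cons.mp ht with rfl | ht
            · exact haccr2 y hy
            · exact hbr y hy t (List.mem_cons_of_mem _ ht)
          · rw [List.mem_singleton] at hy
            subst hy
            rcases List.mem_cons.mp ht with rfl | ht
            · exact hxr2
            · exact hxq t ht
      case _ =>
        have hbb' : List.Pairwise pvSepBB (acc ++ [(x.1, x.2.1, x.2.2)]) := by
          rw [List.pairwise_append]
          refine ⟨hbb, List.pairwise_singleton _ _, ?_⟩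
          intro y hy z hz
          rw [List.mem_singleton] at hz
          subst hz
          exact hsepx y hy
        have hbok' : ∀ y ∈ acc ++ [(x.1, x.2.1, x.2.2)], pvBOK la lb y := by
          intro y hy
          rcases List.mem_append.mp hy with hy | hy
          · exact hbok y hy
          · rw [List.mem_singleton] at hy
            subst hy
            exact ⟨hxla, hxlb, Nat.pos_of_ne_zero hk⟩
        refine ih _ _ ?_ ?_ ?_ hbb' hbok'
        · intro t ht
          rcases List.mem_cons.mp ht with rfl | ht
          · exact hr1ok
          · exact hqtail t ht
        · rw [List.pairwise_cons]
          exact ⟨hr1q, hpw'.2⟩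
        · intro y hy t ht
          rcases List.mem_append.mp hy with hy | hy
          · rcases List.mem_cons.mp ht with rfl | ht
            · exact haccr1 y hy
            · exact hbr y hy t (List.mem_cons_of_mem _ ht)
          · rw [List.mem_singleton] at hy
            subst hy
            rcases List.mem_cons.mp ht with rfl | ht
            · exact hxr1
            · exact hxq t ht
      case _ =>
        have hbb' : List.Pairwise pvSepBB (acc ++ [(x.1, x.2.1, x.2.2)]) := by
          rw [List.pairwise_append]
          refine ⟨hbb, List.pairwise_singleton _ _, ?_⟩
          intro y hy z hz
          rw [List.mem_singleton] at hz
          subst hz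
          exact hsepx y hy
        have hbok' : ∀ y ∈ acc ++ [(x.1, x.2.1, x.2.2)], pvBOK la lb y := by
          intro y hy
          rcases List.mem_append.mp hy with hy | hy
          · exact hbok y hy
          · rw [List.mem_singleton] at hy
            subst hy
            exact ⟨hxla, hxlb, Nat.pos_of_ne_zero hk⟩
        refine ih _ _ hqtail hpw'.2 ?_ hbb' hbok'
        intro y hy t ht
        rcases List.mem_append.mp hy with hy | hy
        · exact hbr y hy t (List.mem_cons_of_mem _ ht)
        · rw [List.mem_singleton] at hy
          subst hy
          exact hxq t ht
      case _ =>
        exact ih queue acc hqtail hpw'.2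
          (fun y hy t ht => hbr y hy t (List.mem_cons_of_mem _ ht)) hbb hbok

-- ---------- sorted + separated + positive ⇒ a chain; coalescing keeps it ----------

theorem pvBlockLE_trans (u v w : Nat × Nat × Nat)
    (h1 : pvBlockLE u v = true) (h2 : pvBlockLE v w = true) : pvBlockLE u w = true := by
  unfold pvBlockLE at *
  simp only [decide_eq_true_eq] at *
  omega

theorem pvBlockLE_total (u v : Nat × Nat × Nat) :
    (pvBlockLE u v || pvBlockLE v u) = true := by
  unfold pvBlockLE
  rw [Bool.or_eq_true]
  simp only [decide_eq_true_eq]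
  omega

theorem pvSorted_chain (la lb : Nat) (raw : List (Nat × Nat × Nat))
    (hpw : List.Pairwise pvSepBB raw) (hbok : ∀ x ∈ raw, pvBOK la lb x) :
    List.Pairwise pvChainB (raw.mergeSort pvBlockLE) := by
  have hperm := List.mergeSort_perm raw pvBlockLE
  have hsym : ∀ {u v : Nat × Nat × Nat}, pvSepBB u v → pvSepBB v u := fun h => Or.symm h
  have hpw2 : List.Pairwise pvSepBB (raw.mergeSort pvBlockLE) :=
    (hperm.pairwise_iff hsym).mpr hpw
  have hsorted : List.Pairwise (fun u v => pvBlockLE u v = true) (raw.mergeSort pvBlockLE) :=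
    List.pairwise_mergeSort pvBlockLE_trans pvBlockLE_total raw
  have hboth := List.pairwise_and_iff.mpr ⟨hpw2, hsorted⟩
  refine hboth.imp_of_mem ?_
  intro u v _ hv ⟨hsep, hle⟩
  rcases hsep with h | h
  · exact h
  · exfalso
    have hbv := hbok v (hperm.subset hv)
    unfold pvChainB at h
    unfold pvBOK at hbv
    unfold pvBlockLE at hle
    simp only [decide_eq_true_eq] at hle
    omega

-- two-sided chain with final sentinel: what rendering needs from the block list
def pvGood (la lb : Nat) : Nat → Nat → List (Nat × Nat × Nat) → Prop
  | i, j, [] => i = la ∧ j = lb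
  | i, j, (i0, j0, s) :: rest =>
    i ≤ i0 ∧ j ≤ j0 ∧ i0 + s ≤ la ∧ j0 + s ≤ lb ∧
    (s = 0 → i0 = la ∧ j0 = lb ∧ rest = []) ∧ pvGood la lb (i0 + s) (j0 + s) rest

theorem pvMergeAdj_good (la lb : Nat) :
    ∀ (l : List (Nat × Nat × Nat)) (i1 j1 k1 i j : Nat),
      List.Pairwise pvChainB l → (∀ x ∈ l, pvBOK la lb x) →
      (∀ x ∈ l, pvChainB (i1, j1, k1) x) →
      i ≤ i1 → j ≤ j1 → i1 + k1 ≤ la → j1 + k1 ≤ lb →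
      pvGood la lb i j (pvMergeAdj l i1 j1 k1 ++ [(la, lb, 0)]) := by
  intro l
  induction l with
  | nil =>
    intro i1 j1 k1 i j _ _ _ h4 h5 h6 h7
    simp only [pvMergeAdj]
    split_ifs with hk
    · refine ⟨h4, h5, h6, h7, fun h => absurd h hk, ?_⟩
      refine ⟨by omega, by omega, by omega, by omega, fun _ => ⟨rfl, rfl, rfl⟩, ?_⟩
      exact ⟨by omega, by omega⟩
    · refine ⟨by omega, by omega, by omega, by omega, fun _ => ⟨rfl, rfl, rfl⟩, ?_⟩
      exact ⟨by omega, by omega⟩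
  | cons hd rest ih =>
    obtain ⟨i2, j2, k2⟩ := hd
    intro i1 j1 k1 i j hpw hbok hch h4 h5 h6 h7
    have hpw' := List.pairwise_cons.mp hpw
    have hbok2 := hbok _ List.mem_cons_self
    have hch2 := hch _ List.mem_cons_self
    have hbokt : ∀ z ∈ rest, pvBOK la lb z := fun z hz => hbok z (List.mem_cons_of_mem _ hz)
    simp only [pvMergeAdj]
    split_ifs with ht hk
    · refine ih i1 j1 (k1 + k2) i j hpw'.2 hbokt ?_ h4 h5 ?_ ?_
      · intro z hz
        have hz2 := hpw'.1 z hz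
        have ha1 : i2 + k2 ≤ z.1 := hz2.1
        have ha2 : j2 + k2 ≤ z.2.1 := hz2.2
        have hh1 := ht.1
        have hh2 := ht.2
        unfold pvChainB
        constructor
        · show i1 + (k1 + k2) ≤ z.1
          omega
        · show j1 + (k1 + k2) ≤ z.2.1
          omega
      · have hb1 : i2 + k2 ≤ la := hbok2.1
        have hh := ht.1
        omega
      · have hb2 : j2 + k2 ≤ lb := hbok2.2.1
        have hh := ht.2
        omega
    · simp only [List.cons_append, List.nil_append]
      refine ⟨h4, h5, h6, h7, fun h => absurd h hk, ?_⟩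
      refine ih i2 j2 k2 (i1 + k1) (j1 + k1) hpw'.2 hbokt hpw'.1 ?_ ?_ ?_ ?_
      · exact hch2.1
      · exact hch2.2
      · exact hbok2.1
      · exact hbok2.2.1
    · simp only [List.nil_append]
      refine ih i2 j2 k2 i j hpw'.2 hbokt hpw'.1 ?_ ?_ ?_ ?_
      · have hc : i1 + k1 ≤ i2 := hch2.1
        omega
      · have hc : j1 + k1 ≤ j2 := hch2.2
        omega
      · exact hbok2.1
      · exact hbok2.2.1

theorem pvGood_projE (la lb : Nat) :
    ∀ (l : List (Nat × Nat × Nat)) (i j : Nat),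
      pvGood la lb i j l → pvGoodS la i (l.map pvProjE) := by
  intro l
  induction l with
  | nil => intro i j h; exact h.1
  | cons hd rest ih =>
    obtain ⟨i0, j0, s⟩ := hd
    intro i j h
    obtain ⟨h1, h2, h3, h4, h5, h6⟩ := h
    exact ⟨h1, h3, fun hs => ⟨(h5 hs).1, by rw [(h5 hs).2.2]; rfl⟩, ih (i0 + s) (j0 + s) h6⟩

theorem pvGood_projA (la lb : Nat) :
    ∀ (l : List (Nat × Nat × Nat)) (i j : Nat),
      pvGood la lb i j l → pvGoodS lb j (l.map pvProjA) := by
  intro l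
  induction l with
  | nil => intro i j h; exact h.2
  | cons hd rest ih =>
    obtain ⟨i0, j0, s⟩ := hd
    intro i j h
    obtain ⟨h1, h2, h3, h4, h5, h6⟩ := h
    exact ⟨h2, h4, fun hs => ⟨(h5 hs).2.1, by rw [(h5 hs).2.2]; rfl⟩, ih (i0 + s) (j0 + s) h6⟩

theorem pvRaw_ok (e a : List Char) :
    List.Pairwise pvSepBB (pvMbLoop e a (pvB2j a) (e.length + a.length + 1)
      [(0, e.length, 0, a.length)] []) ∧
    (∀ x ∈ pvMbLoop e a (pvB2j a) (e.length + a.length + 1)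
      [(0, e.length, 0, a.length)] [], pvBOK e.length a.length x) :=
  pvMbLoop_ok e a (pvB2j a) e.length a.length
    (e.length + a.length + 1) [(0, e.length, 0, a.length)] []
    (by
      intro r hr
      rw [List.mem_singleton] at hr
      subst hr
      exact ⟨Nat.zero_le _, Nat.zero_le _, le_rfl, le_rfl⟩)
    (List.pairwise_singleton _ _)
    (by intro x hx; simp at hx)
    List.Pairwise.nil
    (by intro x hx; simp at hx)

theorem pvBlocks_good (e a : List Char) :
    pvGood e.length a.length 0 0 (pvMatchingBlocks e a) := by
  obtain ⟨hpw, hbok⟩ := pvRaw_ok e a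
  have hchain := pvSorted_chain e.length a.length _ hpw hbok
  have hmembok : ∀ z ∈ (pvMbLoop e a (pvB2j a) (e.length + a.length + 1)
      [(0, e.length, 0, a.length)] []).mergeSort pvBlockLE, pvBOK e.length a.length z :=
    fun z hz => hbok z ((List.mergeSort_perm _ pvBlockLE).subset hz)
  exact pvMergeAdj_good e.length a.length _ 0 0 0 0 0 hchain hmembok
    (fun x _ => ⟨Nat.zero_le _, Nat.zero_le _⟩) le_rfl le_rfl (Nat.zero_le _) (Nat.zero_le _)

-- ---------- B's mark loop = folding the raw blocks into the masks ----------

theorem pvMbLoop_acc (a b : List Char) (b2j : PySem.Dict Char (List Nat)) :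
    ∀ (fuel : Nat) (queue : List (Nat × Nat × Nat × Nat)) (acc : List (Nat × Nat × Nat)),
      pvMbLoop a b b2j fuel queue acc = acc ++ pvMbLoop a b b2j fuel queue [] := by
  intro fuel
  induction fuel with
  | zero => intro queue acc; simp [pvMbLoop]
  | succ n ih =>
    intro queue acc
    cases queue with
    | nil => simp [pvMbLoop]
    | cons r queue =>
      obtain ⟨alo, ahi, blo, bhi⟩ := r
      simp only [pvMbLoop]
      by_cases hk : (pvFlm a b b2j alo ahi blo bhi).2.2 ≠ 0
      · simp only [if_pos hk]
        rw [ih _ (acc ++ [_]), ih _ ([] ++ [_])]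
        simp [List.append_assoc]
      · simp only [if_neg hk]
        exact ih _ acc

theorem pvMarkLoop_eq (a b : List Char) (b2j : PySem.Dict Char (List Nat)) :
    ∀ (fuel : Nat) (queue : List (Nat × Nat × Nat × Nat)) (em am : List Bool),
      pvMarkLoop a b b2j fuel queue (em, am) =
        ((pvMbLoop a b b2j fuel queue []).foldl (fun m x => pvSetRun m x.1 x.2.2) em,
         (pvMbLoop a b b2j fuel queue []).foldl (fun m x => pvSetRun m x.2.1 x.2.2) am) := by
  intro fuel
  induction fuel with
  | zero => intro queue em am; simp [pvMarkLoop, pvMbLoop]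
  | succ n ih =>
    intro queue em am
    cases queue with
    | nil => simp [pvMarkLoop, pvMbLoop]
    | cons r queue =>
      obtain ⟨alo, ahi, blo, bhi⟩ := r
      simp only [pvMarkLoop, pvMbLoop]
      by_cases hk : (pvFlm a b b2j alo ahi blo bhi).2.2 ≠ 0
      · simp only [if_pos hk]
        rw [ih, pvMbLoop_acc a b b2j n _ ([] ++ [_])]
        simp [List.foldl_cons]
      · simp only [if_neg hk]
        exact ih queue em am

-- ---------- sorting and coalescing do not change the covered positions ----------

theorem pvCovered_cons (q : Nat) (p : Nat × Nat) (l : List (Nat × Nat)) :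
    pvCovered q (p :: l) = (decide (p.1 ≤ q ∧ q < p.1 + p.2) || pvCovered q l) := rfl

theorem pvCovered_nil (q : Nat) : pvCovered q [] = false := rfl

theorem pvCoverMerge (A B D : Prop) [Decidable A] [Decidable B] [Decidable D] (C : Bool)
    (h : A ↔ (B ∨ D)) : (decide A || C) = (decide B || (decide D || C)) := by
  cases C
  · simp only [Bool.or_false]
    rw [Bool.eq_iff_iff]
    simp only [Bool.or_eq_true, decide_eq_true_eq]
    exact h
  · simp only [Bool.or_true]

theorem pvCoverSkip (B D : Prop) [Decidable B] [Decidable D] (C : Bool)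
    (h : ¬B) : (decide D || C) = (decide B || (decide D || C)) := by
  simp [h]

theorem pvMergeAdjCoverE (la lb : Nat) :
    ∀ (l : List (Nat × Nat × Nat)) (i1 j1 k1 q : Nat),
      pvCovered q ((pvMergeAdj l i1 j1 k1 ++ [(la, lb, 0)]).map pvProjE) =
        (decide (i1 ≤ q ∧ q < i1 + k1) || pvCovered q (l.map pvProjE)) := by
  intro l
  induction l with
  | nil =>
    intro i1 j1 k1 q
    simp only [pvMergeAdj]
    split_ifs with hk
    · simp only [List.cons_append, List.nil_append, List.map_cons, List.map_nil,
        pvCovered_cons, pvCovered_nil, Bool.or_false]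
      rw [Bool.eq_iff_iff]
      simp only [Bool.or_eq_true, decide_eq_true_eq, pvProjE]
      omega
    · have hk0 : k1 = 0 := by simpa using hk
      simp only [List.nil_append, List.map_cons, List.map_nil, pvCovered_cons,
        pvCovered_nil, Bool.or_false]
      rw [Bool.eq_iff_iff]
      simp only [decide_eq_true_eq, pvProjE]
      omega
  | cons hd rest ih =>
    obtain ⟨i2, j2, k2⟩ := hd
    intro i1 j1 k1 q
    simp only [pvMergeAdj]
    split_ifs with ht hk
    · rw [ih i1 j1 (k1 + k2) q, List.map_cons, pvCovered_cons]
      have ht1 := ht.1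
      exact pvCoverMerge (i1 ≤ q ∧ q < i1 + (k1 + k2)) (i1 ≤ q ∧ q < i1 + k1)
        (i2 ≤ q ∧ q < i2 + k2) (pvCovered q (rest.map pvProjE)) (by omega)
    · simp only [List.cons_append, List.nil_append, List.map_cons, pvCovered_cons,
        ih i2 j2 k2 q]
      rfl
    · have hk0 : k1 = 0 := by simpa using hk
      simp only [List.nil_append, List.map_cons, pvCovered_cons, ih i2 j2 k2 q]
      exact pvCoverSkip (i1 ≤ q ∧ q < i1 + k1) (i2 ≤ q ∧ q < i2 + k2)
        (pvCovered q (rest.map pvProjE)) (by omega)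

theorem pvMergeAdjCoverA (la lb : Nat) :
    ∀ (l : List (Nat × Nat × Nat)) (i1 j1 k1 q : Nat),
      pvCovered q ((pvMergeAdj l i1 j1 k1 ++ [(la, lb, 0)]).map pvProjA) =
        (decide (j1 ≤ q ∧ q < j1 + k1) || pvCovered q (l.map pvProjA)) := by
  intro l
  induction l with
  | nil =>
    intro i1 j1 k1 q
    simp only [pvMergeAdj]
    split_ifs with hk
    · simp only [List.cons_append, List.nil_append, List.map_cons, List.map_nil,
        pvCovered_cons, pvCovered_nil, Bool.or_false]
      rw [Bool.eq_iff_iff]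
      simp only [Bool.or_eq_true, decide_eq_true_eq, pvProjA]
      omega
    · have hk0 : k1 = 0 := by simpa using hk
      simp only [List.nil_append, List.map_cons, List.map_nil, pvCovered_cons,
        pvCovered_nil, Bool.or_false]
      rw [Bool.eq_iff_iff]
      simp only [decide_eq_true_eq, pvProjA]
      omega
  | cons hd rest ih =>
    obtain ⟨i2, j2, k2⟩ := hd
    intro i1 j1 k1 q
    simp only [pvMergeAdj]
    split_ifs with ht hk
    · rw [ih i1 j1 (k1 + k2) q, List.map_cons, pvCovered_cons]
      have ht2 := ht.2
      exact pvCoverMerge (j1 ≤ q ∧ q < j1 + (k1 + k2)) (j1 ≤ q ∧ q < j1 + k1)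
        (j2 ≤ q ∧ q < j2 + k2) (pvCovered q (rest.map pvProjA)) (by omega)
    · simp only [List.cons_append, List.nil_append, List.map_cons, pvCovered_cons,
        ih i2 j2 k2 q]
      rfl
    · have hk0 : k1 = 0 := by simpa using hk
      simp only [List.nil_append, List.map_cons, pvCovered_cons, ih i2 j2 k2 q]
      exact pvCoverSkip (j1 ≤ q ∧ q < j1 + k1) (j2 ≤ q ∧ q < j2 + k2)
        (pvCovered q (rest.map pvProjA)) (by omega)

-- ---------- B's masks compute coverage of A's final block list ----------

theorem pvMask_getD_E (e a : List Char) (q : Nat) :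
    ((pvMbLoop e a (pvB2j a) (e.length + a.length + 1) [(0, e.length, 0, a.length)] []).foldl
        (fun m x => pvSetRun m x.1 x.2.2) (List.replicate e.length false)).getD q false =
      pvCovered q ((pvMatchingBlocks e a).map pvProjE) := by
  obtain ⟨-, hbok⟩ := pvRaw_ok e a
  set raw := pvMbLoop e a (pvB2j a) (e.length + a.length + 1)
    [(0, e.length, 0, a.length)] [] with hraw
  have hfold : raw.foldl (fun m x => pvSetRun m x.1 x.2.2) (List.replicate e.length false) =
      (raw.map pvProjE).foldl (fun m (p : Nat × Nat) => pvSetRun m p.1 p.2)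
        (List.replicate e.length false) := by
    rw [List.foldl_map]
    rfl
  rw [hfold, pvMaskFold_getD (raw.map pvProjE) _ ?_ q, pvReplicate_getD, Bool.or_false]
  · have hperm := (List.mergeSort_perm raw pvBlockLE).map pvProjE
    have hp : pvCovered q (raw.map pvProjE) =
        pvCovered q ((raw.mergeSort pvBlockLE).map pvProjE) := by
      unfold pvCovered
      exact hperm.any_eq.symm
    rw [hp]
    have hmb : pvMatchingBlocks e a =
        pvMergeAdj (raw.mergeSort pvBlockLE) 0 0 0 ++ [(e.length, a.length, 0)] := rfl
    rw [hmb, pvMergeAdjCoverE e.length a.length _ 0 0 0 q]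
    simp
  · intro p hp
    rw [List.mem_map] at hp
    obtain ⟨x, hx, rfl⟩ := hp
    rw [List.length_replicate]
    exact (hbok x hx).1

theorem pvMask_getD_A (e a : List Char) (q : Nat) :
    ((pvMbLoop e a (pvB2j a) (e.length + a.length + 1) [(0, e.length, 0, a.length)] []).foldl
        (fun m x => pvSetRun m x.2.1 x.2.2) (List.replicate a.length false)).getD q false =
      pvCovered q ((pvMatchingBlocks e a).map pvProjA) := by
  obtain ⟨-, hbok⟩ := pvRaw_ok e a
  set raw := pvMbLoop e a (pvB2j a) (e.length + a.length + 1)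
    [(0, e.length, 0, a.length)] [] with hraw
  have hfold : raw.foldl (fun m x => pvSetRun m x.2.1 x.2.2) (List.replicate a.length false) =
      (raw.map pvProjA).foldl (fun m (p : Nat × Nat) => pvSetRun m p.1 p.2)
        (List.replicate a.length false) := by
    rw [List.foldl_map]
    rfl
  rw [hfold, pvMaskFold_getD (raw.map pvProjA) _ ?_ q, pvReplicate_getD, Bool.or_false]
  · have hperm := (List.mergeSort_perm raw pvBlockLE).map pvProjA
    have hp : pvCovered q (raw.map pvProjA) =
        pvCovered q ((raw.mergeSort pvBlockLE).map pvProjA) := by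
      unfold pvCovered
      exact hperm.any_eq.symm
    rw [hp]
    have hmb : pvMatchingBlocks e a =
        pvMergeAdj (raw.mergeSort pvBlockLE) 0 0 0 ++ [(e.length, a.length, 0)] := rfl
    rw [hmb, pvMergeAdjCoverA e.length a.length _ 0 0 0 q]
    simp
  · intro p hp
    rw [List.mem_map] at hp
    obtain ⟨x, hx, rfl⟩ := hp
    rw [List.length_replicate]
    exact (hbok x hx).2.1

-- ===== VERDICT (by name: the statement is the Claim_ definition above) =====
theorem render_char_diff_spec : Claim_equal_render_char_diff := by
  intro expected actual _
  unfold Spec_render_char_diff render_char_diff render_char_diff_alt pvRenderSide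
  simp only []
  have hGood := pvBlocks_good expected.toList actual.toList
  rw [pvALoop_opcodes_eq_pvBLoop, pvBLoop_eq_walks, pvMarkLoop_eq]
  simp only [List.nil_append]
  rw [Prod.mk.injEq]
  constructor
  · apply String.ext
    rw [pvJoin_toList, pvJoin_toList]
    exact (pvSide expected.toList pvAnsiRed _ _ 0
      (pvGood_projE _ _ _ 0 0 hGood)
      (fun q _ => pvMask_getD_E expected.toList actual.toList q)).symm
  · apply String.ext
    rw [pvJoin_toList, pvJoin_toList]
    exact (pvSide actual.toList pvAnsiGreen _ _ 0
      (pvGood_projA _ _ _ 0 0 hGood)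
      (fun q _ => pvMask_getD_A expected.toList actual.toList q)).symm
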